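-- pv_equiv track=rewrite | github.com/fpetm/elker | script/genvars.py | genvars
-- ===== SOURCE A (Python) =====
-- import itertools
--
-- MAX = 10
--
-- def rows(table, column_count, row_count, k):
--     index = 0
--     while index < row_count:
--         yield table[index*column_count+k]
--         index += 1
--
-- def cols(table, column_count, k):
--     index = 0
--     while index < column_count:
--         yield table[k*column_count+index]
--         index += 1
--
-- def genvars(column_count, row_count, summa_a, summa_b):
--     products = itertools.product(*[range(0,MAX+1) for _ in range(column_count*row_count)])
--
--     ret = []
--
--     for product in products:
--         if sum(product) != MAX:
--             continue
--         try:
--             for k, summa in enumerate(summa_a):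
--                 if sum(rows(product, column_count, row_count, k)) != summa:
--                     raise StopIteration
--             for k, summa in enumerate(summa_b):
--                 if sum(cols(product, column_count, k)) != summa:
--                     raise StopIteration
--         except StopIteration:
--             continue
--
--         ret.append(product)
--     return ret
-- ===== SOURCE B (Python) =====
-- MAX = 10
--
-- def genvars(column_count, row_count, summa_a, summa_b):
--     # Build, layer by layer, only the tuples whose entries sum to MAX (weak
--     # compositions of the budget), then keep those matching the row/column sums,
--     # instead of scanning all (MAX+1)**(cols*rows) product tuples.
--     if column_count <= 0 or row_count <= 0:
--         return []
--     n = column_count * row_count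
--
--     partial = [((), MAX)]                # (prefix, remaining budget)
--     for _ in range(n):
--         partial = [(t + (v,), r - v) for (t, r) in partial for v in range(r + 1)]
--     comps = [t for (t, r) in partial if r == 0]
--
--     def ok(t):
--         for k, s in enumerate(summa_a):
--             if sum(t[i * column_count + k] for i in range(row_count)) != s:
--                 return False
--         for k, s in enumerate(summa_b):
--             if sum(t[k * column_count + i] for i in range(column_count)) != s:
--                 return False
--         return True
--
--     return [t for t in comps if ok(t)]
-- ===== Notes on version B (the rewrite author's own statement) =====
-- stated objective: alternative
-- what changed: B builds, layer by layer, only the tuples whose entries sum to MAX (weak compositions of the budget) and filters them by the row/column sum checks, instead of scanning all (MAX+1)^(cols*rows) product tuples and filtering; it trades the lazy product scan for materialised layers of prefixes.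
-- outside the precondition, e.g. on genvars(-1, -1, [], []): A returns [(10,)], B returns []; on genvars(1, 1, [5, 5], []): A returns [], B returns []
import Mathlib
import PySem

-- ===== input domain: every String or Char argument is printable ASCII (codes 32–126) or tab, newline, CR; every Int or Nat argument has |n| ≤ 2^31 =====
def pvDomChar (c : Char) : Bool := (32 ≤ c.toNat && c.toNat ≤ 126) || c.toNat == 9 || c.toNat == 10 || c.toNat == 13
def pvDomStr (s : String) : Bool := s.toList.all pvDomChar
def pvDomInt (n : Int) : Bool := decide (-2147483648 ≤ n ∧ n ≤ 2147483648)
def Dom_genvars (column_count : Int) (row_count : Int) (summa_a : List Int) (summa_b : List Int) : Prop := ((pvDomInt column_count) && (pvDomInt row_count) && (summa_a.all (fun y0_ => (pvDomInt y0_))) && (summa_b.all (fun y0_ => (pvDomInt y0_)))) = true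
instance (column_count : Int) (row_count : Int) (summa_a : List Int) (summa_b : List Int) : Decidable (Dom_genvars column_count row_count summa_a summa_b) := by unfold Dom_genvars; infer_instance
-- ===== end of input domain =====

-- B builds, layer by layer, only the tuples summing to MAX (weak compositions of the budget)
-- and filters them by the row/column sum checks, instead of scanning all
-- (MAX+1)^(cols*rows) product tuples and filtering.


-- ===== PORT A =====
-- sum(rows(table, cc, rc, k)): while index < rc: yield table[index*cc+k].
-- table[...] is ported as pyGetD with default 0; Pre_genvars guarantees the index is in range
-- wherever Python evaluates it (Python raises IndexError out of range).
def pvRowSumA (table : List Int) (cc rc k : Int) : Int :=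
  (PySem.List.pyRange 0 rc 1).foldl (fun acc i => acc + PySem.List.pyGetD table (i * cc + k) 0) 0

-- sum(cols(table, cc, k)): while index < cc: yield table[k*cc+index]
def pvColSumA (table : List Int) (cc k : Int) : Int :=
  (PySem.List.pyRange 0 cc 1).foldl (fun acc i => acc + PySem.List.pyGetD table (k * cc + i) 0) 0

-- itertools.product(*[range(0, MAX+1) for _ in range(n)]): lexicographic, rightmost fastest
def pvProducts : Nat → List (List Int)
  | 0 => [[]]
  | n + 1 => (PySem.List.pyRange 0 11 1).flatMap (fun v => (pvProducts n).map (fun t => v :: t))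

def genvars (column_count : Int) (row_count : Int) (summa_a : List Int) (summa_b : List Int) : List (List Int) :=
  (pvProducts ((column_count * row_count).toNat)).filter (fun product =>
    product.sum == 10 &&
    (PySem.List.enumerate summa_a 0).all
      (fun ks => pvRowSumA product column_count row_count ks.1 == ks.2) &&
    (PySem.List.enumerate summa_b 0).all
      (fun ks => pvColSumA product column_count ks.1 == ks.2))

-- ===== PORT B =====
-- one layer of B's loop: extend every (prefix, remaining budget) by one more cell
def pvStep (stack : List (List Int × Int)) : List (List Int × Int) :=
  stack.flatMap (fun tr =>
    (PySem.List.pyRange 0 (tr.2 + 1) 1).map (fun v => (tr.1 ++ [v], tr.2 - v)))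

-- 'for _ in range(n): partial = [... one layer ...]'
def pvGrow : Nat → List (List Int × Int) → List (List Int × Int)
  | 0, partial_ => partial_
  | n + 1, partial_ => pvGrow n (pvStep partial_)

-- ok(t): the row/column sum checks (sums written as generator expressions: map then sum)
def pvOkB (cc rc : Int) (summa_a summa_b : List Int) (t : List Int) : Bool :=
  (PySem.List.enumerate summa_a 0).all (fun ks =>
    ((PySem.List.pyRange 0 rc 1).map (fun i => PySem.List.pyGetD t (i * cc + ks.1) 0)).sum == ks.2) &&
  (PySem.List.enumerate summa_b 0).all (fun ks =>
    ((PySem.List.pyRange 0 cc 1).map (fun i => PySem.List.pyGetD t (ks.1 * cc + i) 0)).sum == ks.2)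

def genvars_alt (column_count : Int) (row_count : Int) (summa_a : List Int) (summa_b : List Int) : List (List Int) :=
  if column_count ≤ 0 ∨ row_count ≤ 0 then []
  else
    ((((pvGrow ((column_count * row_count).toNat) [([], 10)]).filter
        (fun tr => tr.2 == 0)).map (fun tr => tr.1)).filter
      (pvOkB column_count row_count summa_a summa_b))

-- ===== PRECONDITION & SPEC =====
-- Pre_ excludes (i) two-negative-dimension inputs (column_count*row_count > 0 with both factors
-- negative), on which A's while-loop generators degenerate and A enumerates a nonempty grid with
-- vacuously-true checks, and (ii) positive dimensions with a summa list longer than the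
-- corresponding dimension, on which A's generators index the grid out of range: A raises
-- IndexError as soon as some candidate passes the in-range checks (where it does not raise,
-- it returns [], and B returns [] there too).
def Pre_genvars (column_count : Int) (row_count : Int) (summa_a : List Int) (summa_b : List Int) : Prop :=
  column_count * row_count ≤ 0 ∨
    (0 < column_count ∧ 0 < row_count ∧
      (summa_a.length : Int) ≤ column_count ∧ (summa_b.length : Int) ≤ row_count)
instance (column_count : Int) (row_count : Int) (summa_a : List Int) (summa_b : List Int) : Decidable (Pre_genvars column_count row_count summa_a summa_b) := by unfold Pre_genvars; infer_instance

def pvWitness_genvars : Int × Int × List Int × List Int := (2, 2, [4, 6], [7, 3])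

def Spec_genvars (column_count : Int) (row_count : Int) (summa_a : List Int) (summa_b : List Int) (out : List (List Int)) : Prop := out = genvars_alt column_count row_count summa_a summa_b
instance (column_count : Int) (row_count : Int) (summa_a : List Int) (summa_b : List Int) (out : List (List Int)) : Decidable (Spec_genvars column_count row_count summa_a summa_b out) := by unfold Spec_genvars; infer_instance

-- ===== CLAIM (what is proved, stated in full; the proofs are below) =====
def Claim_equal_genvars : Prop := ∀ (column_count : Int) (row_count : Int) (summa_a : List Int) (summa_b : List Int), Dom_genvars column_count row_count summa_a summa_b → Pre_genvars column_count row_count summa_a summa_b → Spec_genvars column_count row_count summa_a summa_b (genvars column_count row_count summa_a summa_b)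

-- ===== LEMMAS AND PROOFS =====

-- specification of B's layered construction: the prefixes with budget b, cons-structured
def pvPref : Int → Nat → List (List Int)
  | _, 0 => [[]]
  | b, n + 1 =>
    (PySem.List.pyRange 0 (b + 1) 1).flatMap (fun v => (pvPref (b - v) n).map (fun t => v :: t))

lemma pvProducts_sum_nonneg : ∀ (n : Nat) (t : List Int), t ∈ pvProducts n → 0 ≤ t.sum := by
  intro n
  induction n with
  | zero => intro t ht; simp [pvProducts] at ht; simp [ht]
  | succ n ih =>
    intro t ht
    simp only [pvProducts, List.mem_flatMap, List.mem_map] at ht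
    obtain ⟨v, hv, t', ht', rfl⟩ := ht
    rw [PySem.List.mem_pyRange_one] at hv
    have := ih t' ht'
    simp only [List.sum_cons]
    omega

lemma pvGrow_nil : ∀ (n : Nat), pvGrow n [] = [] := by
  intro n
  induction n with
  | zero => rfl
  | succ n ih => rw [pvGrow]; simpa [pvStep] using ih

lemma pvGrow_append : ∀ (n : Nat) (L1 L2 : List (List Int × Int)),
    pvGrow n (L1 ++ L2) = pvGrow n L1 ++ pvGrow n L2 := by
  intro n
  induction n with
  | zero => intro L1 L2; rfl
  | succ n ih =>
    intro L1 L2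
    rw [pvGrow, pvGrow, pvGrow]
    rw [show pvStep (L1 ++ L2) = pvStep L1 ++ pvStep L2 from List.flatMap_append]
    exact ih _ _

lemma pvGrow_eq_flatMap : ∀ (n : Nat) (L : List (List Int × Int)),
    pvGrow n L = L.flatMap (fun x => pvGrow n [x]) := by
  intro n L
  induction L with
  | nil => simp [pvGrow_nil]
  | cons x L ih =>
    rw [show x :: L = [x] ++ L from rfl, pvGrow_append, ih]
    simp

lemma pvGrow_singleton : ∀ (n : Nat) (t : List Int) (b : Int),
    pvGrow n [(t, b)] = (pvPref b n).map (fun s => (t ++ s, b - s.sum)) := by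
  intro n
  induction n with
  | zero => intro t b; simp [pvGrow, pvPref]
  | succ n ih =>
    intro t b
    rw [pvGrow]
    rw [show pvStep [(t, b)]
        = (PySem.List.pyRange 0 (b + 1) 1).map (fun v => (t ++ [v], b - v)) by simp [pvStep]]
    rw [pvGrow_eq_flatMap, List.flatMap_map]
    rw [pvPref, List.map_flatMap]
    apply List.flatMap_congr
    intro v hv
    rw [ih (t ++ [v]) (b - v), List.map_map]
    apply List.map_congr_left
    intro s _
    simp only [Function.comp_apply, List.sum_cons, Prod.mk.injEq, List.append_assoc,
      List.singleton_append]
    exact ⟨trivial, by omega⟩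

lemma pvFilter_cons_sum (b v : Int) (X : List (List Int)) :
    List.filter (fun t => t.sum == b) (X.map (fun t => v :: t))
      = (X.filter (fun t => t.sum == b - v)).map (fun t => v :: t) := by
  rw [List.filter_map]
  congr 1
  apply List.filter_congr
  intro t _
  simp only [Function.comp, List.sum_cons]
  by_cases h : t.sum = b - v
  · simp [h]
  · simp [h]; omega

lemma pvPref_filter_eq : ∀ (n : Nat) (b : Int), 0 ≤ b → b ≤ 10 →
    (pvPref b n).filter (fun t => t.sum == b)
      = (pvProducts n).filter (fun t => t.sum == b) := by
  intro n
  induction n with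
  | zero => intro b _ _; rfl
  | succ n ih =>
    intro b hb0 hb10
    rw [pvPref, pvProducts, List.filter_flatMap, List.filter_flatMap]
    rw [PySem.List.pyRange_one_append 0 (b + 1) 11 (by omega) (by omega), List.flatMap_append]
    have htail : (PySem.List.pyRange (b + 1) 11 1).flatMap
        (fun v => List.filter (fun t => t.sum == b) (List.map (fun t => v :: t) (pvProducts n))) = [] := by
      rw [List.flatMap_eq_nil_iff]
      intro v hv
      rw [PySem.List.mem_pyRange_one] at hv
      rw [List.filter_map, List.filter_eq_nil_iff.mpr, List.map_nil]
      intro t ht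
      have hnn := pvProducts_sum_nonneg n t ht
      simp only [Function.comp, List.sum_cons, beq_iff_eq]
      omega
    rw [htail, List.append_nil]
    apply List.flatMap_congr
    intro v hv
    rw [PySem.List.mem_pyRange_one] at hv
    rw [pvFilter_cons_sum, pvFilter_cons_sum, ih (b - v) (by omega) (by omega)]

-- foldl-accumulated sum (port A) equals map-then-sum (port B)
lemma pvRowSumA_eq (t : List Int) (cc rc k : Int) :
    pvRowSumA t cc rc k
      = ((PySem.List.pyRange 0 rc 1).map (fun i => PySem.List.pyGetD t (i * cc + k) 0)).sum := by
  unfold pvRowSumA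
  rw [PySem.List.foldl_add]
  ring

lemma pvColSumA_eq (t : List Int) (cc k : Int) :
    pvColSumA t cc k
      = ((PySem.List.pyRange 0 cc 1).map (fun i => PySem.List.pyGetD t (k * cc + i) 0)).sum := by
  unfold pvColSumA
  rw [PySem.List.foldl_add]
  ring

-- ===== VERDICT (by name: the statement is the Claim_ definition above) =====
theorem genvars_spec : Claim_equal_genvars := by
  intro cc rc sa sb _ hpre
  unfold Spec_genvars genvars genvars_alt
  rcases hpre with hz | ⟨hc, hr, -, -⟩
  · have h0 : cc ≤ 0 ∨ rc ≤ 0 := by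
      by_contra h
      push Not at h
      nlinarith [mul_pos h.1 h.2]
    rw [if_pos h0, Int.toNat_of_nonpos hz]
    simp [pvProducts]
  · rw [if_neg (by omega)]
    rw [pvGrow_singleton]
    simp only [List.filter_map, List.map_map, Function.comp_def, List.nil_append,
      List.filter_filter]
    rw [List.map_id']
    rw [List.filter_congr (fun a _ =>
      show (pvOkB cc rc sa sb a && (10 - a.sum == 0)) = (pvOkB cc rc sa sb a && (a.sum == 10)) by
        have h1 : ((10 - a.sum == 0) : Bool) = (a.sum == 10) := by
          rw [Bool.eq_iff_iff]
          simp only [beq_iff_eq]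
          omega
        rw [h1])]
    conv_rhs => rw [← List.filter_filter, pvPref_filter_eq _ 10 (by norm_num) (by norm_num),
      List.filter_filter]
    apply List.filter_congr
    intro t _
    simp only [pvOkB, pvRowSumA_eq, pvColSumA_eq]
    ac_rfl
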